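-- pv_equiv track=rewrite | github.com/MayurNandanwar/DSS | Python/patterns_code.py | rev_num_desc
-- ===== SOURCE A (Python) =====
-- def rev_num_desc(n):
--     lst =[]
--     for i in range(n,0,-1):
--         x = ''
--         for i in range(i,0,-1):
--             x+=str(i)
--         lst.append(x)
--     return '\n'.join(lst)
-- ===== SOURCE B (Python) =====
-- def rev_num_desc(n):
--     rows = []
--     s = ''
--     for i in range(1, n + 1):
--         s = str(i) + s
--         rows.append(s)
--     return '\n'.join(reversed(rows))
-- ===== Notes on version B (the rewrite author's own statement) =====
-- stated objective: alternative
-- what changed: Replaces the nested loop that rebuilds every row digit-by-digit with a single ascending pass that extends one running row string and joins the collected rows in reverse.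
import Mathlib
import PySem

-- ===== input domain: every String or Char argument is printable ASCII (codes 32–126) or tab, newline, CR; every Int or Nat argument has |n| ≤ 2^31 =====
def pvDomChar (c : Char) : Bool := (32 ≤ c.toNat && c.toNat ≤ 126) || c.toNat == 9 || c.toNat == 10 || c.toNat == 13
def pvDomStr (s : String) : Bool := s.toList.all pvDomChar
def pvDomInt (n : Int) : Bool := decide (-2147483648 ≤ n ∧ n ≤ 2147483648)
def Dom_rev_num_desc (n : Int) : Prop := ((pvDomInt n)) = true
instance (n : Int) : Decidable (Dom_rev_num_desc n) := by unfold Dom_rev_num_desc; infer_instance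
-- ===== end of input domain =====

-- B replaces A's nested row-rebuilding loops by a single ascending pass that extends one running row string and joins the rows in reverse (alternative decomposition).

-- ===== PORT A =====
def rev_num_desc (n : Int) : String :=
  let lst := (PySem.List.pyRange n 0 (-1)).foldl
    (fun lst i =>
      let x := (PySem.List.pyRange i 0 (-1)).foldl (fun x j => x ++ PySem.Int.toStr j) ""
      lst ++ [x]) ([] : List String)
  PySem.Str.join "\n" lst

-- ===== PORT B =====
def rev_num_desc_alt (n : Int) : String :=
  let p := (PySem.List.pyRange 1 (n + 1) 1).foldl
    (fun (p : List String × String) i =>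
      let s := PySem.Int.toStr i ++ p.2
      (p.1 ++ [s], s)) (([] : List String), "")
  PySem.Str.join "\n" p.1.reverse

-- ===== PRECONDITION & SPEC =====
def Spec_rev_num_desc (n : Int) (out : String) : Prop := out = rev_num_desc_alt n
instance (n : Int) (out : String) : Decidable (Spec_rev_num_desc n out) := by unfold Spec_rev_num_desc; infer_instance

-- ===== CLAIM (what is proved, stated in full; the proofs are below) =====
def Claim_equal_rev_num_desc : Prop := ∀ (n : Int), Dom_rev_num_desc n → Spec_rev_num_desc n (rev_num_desc n)

-- ===== LEMMAS AND PROOFS =====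

/-- A's inner-loop row for value `i`. -/
def pvRow (i : Int) : String :=
  (PySem.List.pyRange i 0 (-1)).foldl (fun x j => x ++ PySem.Int.toStr j) ""

theorem pvFoldl_append_pull (l : List Int) (a : String) :
    l.foldl (fun x j => x ++ PySem.Int.toStr j) a
      = a ++ l.foldl (fun x j => x ++ PySem.Int.toStr j) "" := by
  induction l generalizing a with
  | nil => simp
  | cons h t ih =>
      simp only [List.foldl_cons]
      rw [ih (a ++ PySem.Int.toStr h), ih ("" ++ PySem.Int.toStr h)]
      simp [String.append_assoc]

theorem pvRow_succ (k : Int) (hk : 0 ≤ k) :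
    pvRow (k + 1) = PySem.Int.toStr (k + 1) ++ pvRow k := by
  unfold pvRow
  rw [PySem.List.pyRange_neg_one_cons (by omega)]
  simp only [List.foldl_cons, add_sub_cancel_right]
  rw [pvFoldl_append_pull]
  simp

theorem pvRow_zero : pvRow 0 = "" := by
  unfold pvRow
  rw [PySem.List.pyRange_neg_one_eq_nil le_rfl]
  rfl

theorem pvFoldl_snoc_map (l : List Int) (acc : List String) :
    l.foldl (fun lst i =>
      lst ++ [(PySem.List.pyRange i 0 (-1)).foldl (fun x j => x ++ PySem.Int.toStr j) ""]) acc
      = acc ++ l.map pvRow := by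
  induction l generalizing acc with
  | nil => simp
  | cons h t ih => simp [ih, pvRow]

/-- B's fold over an ascending range 1..k produces the mapped rows and the last row. -/
theorem pvFoldB (k : Nat) :
    (PySem.List.pyRange 1 (1 + (k : Int)) 1).foldl
      (fun (p : List String × String) i =>
        ((p.1 ++ [PySem.Int.toStr i ++ p.2]), PySem.Int.toStr i ++ p.2)) (([] : List String), "")
      = ((PySem.List.pyRange 1 (1 + (k : Int)) 1).map pvRow, pvRow (k : Int)) := by
  induction k with
  | zero =>
      simp [PySem.List.pyRange_one_eq_nil, pvRow_zero]
  | succ m ih =>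
      have h1 : (1 : Int) ≤ 1 + (m : Int) := by omega
      have hr : PySem.List.pyRange 1 (1 + ((m + 1 : Nat) : Int)) 1
          = PySem.List.pyRange 1 (1 + (m : Int)) 1 ++ [1 + (m : Int)] := by
        have := PySem.List.pyRange_one_succ_right (a := 1) (b := 1 + (m : Int)) h1
        push_cast
        rw [show (1 : Int) + ((m : Int) + 1) = (1 + (m : Int)) + 1 by ring]
        exact this
      rw [hr, List.foldl_append, ih, List.map_append]
      have hrow : PySem.Int.toStr (1 + (m : Int)) ++ pvRow (m : Int) = pvRow (1 + (m : Int)) := by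
        rw [show (1 : Int) + (m : Int) = (m : Int) + 1 by ring, pvRow_succ (m : Int) (by positivity)]
      simp only [List.foldl_cons, List.foldl_nil, hrow]
      push_cast
      simp
      rw [Int.add_comm]

-- ===== VERDICT (by name: the statement is the Claim_ definition above) =====
theorem rev_num_desc_spec : Claim_equal_rev_num_desc := by
  intro n _
  unfold Spec_rev_num_desc rev_num_desc rev_num_desc_alt
  simp only []
  rw [pvFoldl_snoc_map (acc := [])]
  by_cases hn : n ≤ 0
  · rw [PySem.List.pyRange_neg_one_eq_nil hn, PySem.List.pyRange_one_eq_nil (by omega)]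
    simp
  · 
    have hk : n = 1 + ((n - 1).toNat : Int) := by omega
    have hB := pvFoldB (n - 1).toNat
    rw [show n + 1 = 1 + (((n-1).toNat : Int) + 1) by omega] at *
    have hB' := pvFoldB ((n - 1).toNat + 1)
    push_cast at hB'
    rw [show (1 : Int) + (((n-1).toNat : Int) + 1) = 1 + ((n-1).toNat : Int) + 1 by ring] at hB' ⊢
    rw [hB']
    have hrev : PySem.List.pyRange n 0 (-1)
        = (PySem.List.pyRange 1 (1 + ((n-1).toNat : Int) + 1) 1).reverse := by
      rw [PySem.List.pyRange_neg_one_eq_reverse,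
        show (0 : Int) + 1 = 1 from rfl,
        show n + 1 = 1 + (((n - 1).toNat : Int)) + 1 by omega]
    rw [hrev, List.map_reverse]
    simp
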